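-- pv_equiv track=rewrite | github.com/fantasiavsr/intellegence_mobile | public/python/code2.py | is_significant_change
-- ===== SOURCE A (Python) =====
-- def is_significant_change(code):
--     if not code:
--         return False
--     if code.startswith('//'):
--         return False
--     if code.startswith('{') and code.endswith('}'):
--         return False
--     if code.startswith('[') and code.endswith(']'):
--         return False
--     if code.startswith('\"') and code.endswith('\"'):
--         return False
--     if code.startswith('(') and code.endswith(')'):
--         return False
--     if all(char in '{[;,]}\'"' for char in code):
--         return False
--     return True
-- ===== SOURCE B (Python) =====
-- def is_significant_change(code):
--     # One pass over the string: collect first, second and last characters and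
--     # whether any character falls outside the punctuation alphabet, then decide
--     # with a single table-driven formula.
--     PUNCT = '{[;,]}\'"'
--     CLOSER = {'{': '}', '[': ']', '"': '"', '(': ')'}
--     first = second = last = None
--     significant = False
--     i = 0
--     for ch in code:
--         i += 1
--         if i == 1:
--             first = ch
--         elif i == 2:
--             second = ch
--         last = ch
--         if ch not in PUNCT:
--             significant = True
--     if first is None:
--         return False
--     if first == '/' and second == '/':
--         return False
--     if CLOSER.get(first) == last:
--         return False
--     return significant
-- ===== Notes on version B (the rewrite author's own statement) =====
-- stated objective: alternative
-- what changed: A runs staged whole-string passes (startswith/endswith for each wrapper pair, then an all() pass); B makes a single character scan accumulating first, second and last characters plus a has-significant-char flag, then decides once with a closer-table lookup and that flag.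
import Mathlib
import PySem

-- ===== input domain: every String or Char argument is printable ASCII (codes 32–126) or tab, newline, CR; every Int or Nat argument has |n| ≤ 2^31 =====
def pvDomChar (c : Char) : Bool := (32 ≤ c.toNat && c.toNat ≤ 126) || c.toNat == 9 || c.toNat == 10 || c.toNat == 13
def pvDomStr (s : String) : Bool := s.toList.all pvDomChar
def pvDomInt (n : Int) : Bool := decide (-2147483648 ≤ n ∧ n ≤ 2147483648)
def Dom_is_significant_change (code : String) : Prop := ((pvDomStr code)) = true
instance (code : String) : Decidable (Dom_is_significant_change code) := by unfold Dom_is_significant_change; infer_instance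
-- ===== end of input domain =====

-- B replaces A's staged string-method guards (startswith/endswith/all) by a single
-- character scan that accumulates first/second/last char and a significance flag,
-- followed by one table-driven decision; objective: alternative decomposition.

-- ===== PORT A =====
def is_significant_change (code : String) : Bool :=
  if code.toList.isEmpty then false
  else if PySem.Str.startswith code "//" then false
  else if PySem.Str.startswith code "{" && PySem.Str.endswith code "}" then false
  else if PySem.Str.startswith code "[" && PySem.Str.endswith code "]" then false
  else if PySem.Str.startswith code "\"" && PySem.Str.endswith code "\"" then false
  else if PySem.Str.startswith code "(" && PySem.Str.endswith code ")" then false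
  else if code.toList.all (fun c => "{[;,]}'\"".toList.contains c) then false
  else true

-- ===== PORT B =====
-- CLOSER table: opening char -> required closing char
def pvCloser : PySem.Dict Char Char :=
  ((((PySem.Dict.empty.insert '{' '}').insert '[' ']').insert '"' '"').insert '(' ')')

-- one loop iteration of Source B: state (i, first, second, last, significant)
def pvStep (st : Int × Option Char × Option Char × Option Char × Bool) (ch : Char) :
    Int × Option Char × Option Char × Option Char × Bool :=
  (st.1 + 1,
   (if st.1 + 1 = 1 then some ch else st.2.1),
   (if st.1 + 1 = 1 then st.2.2.1 else if st.1 + 1 = 2 then some ch else st.2.2.1),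
   some ch,
   st.2.2.2.2 || !("{[;,]}'\"".toList.contains ch))

def is_significant_change_alt (code : String) : Bool :=
  let st := code.toList.foldl pvStep (0, none, none, none, false)
  match st.2.1 with
  | none => false
  | some first =>
    if first == '/' && st.2.2.1 == some '/' then false
    else if PySem.Dict.get? pvCloser first == st.2.2.2.1 then false
    else st.2.2.2.2

-- ===== PRECONDITION & SPEC =====
def Spec_is_significant_change (code : String) (out : Bool) : Prop := out = is_significant_change_alt code
instance (code : String) (out : Bool) : Decidable (Spec_is_significant_change code out) := by unfold Spec_is_significant_change; infer_instance

-- ===== CLAIM (what is proved, stated in full; the proofs are below) =====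
def Claim_equal_is_significant_change : Prop := ∀ (code : String), Dom_is_significant_change code → Spec_is_significant_change code (is_significant_change code)

-- ===== LEMMAS AND PROOFS =====

lemma getLast?_cons_or (c : Char) (rest : List Char) :
    rest.getLast?.or (some c) = (c :: rest).getLast? := by
  cases rest with
  | nil => rfl
  | cons d t =>
    rw [List.getLast?_cons_cons]
    cases h : (d :: t).getLast? with
    | none => simp [List.getLast?_eq_none_iff] at h
    | some x => rfl

-- after the first two characters the step function only updates i, last and significant
lemma foldl_tail (cs : List Char) : ∀ (i : Int), 2 ≤ i → ∀ (f s l : Option Char) (b : Bool),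
    cs.foldl pvStep (i, f, s, l, b) =
      (i + cs.length, f, s, cs.getLast?.or l,
       b || cs.any (fun c => !("{[;,]}'\"".toList.contains c))) := by
  induction cs with
  | nil => intro i hi f s l b; simp
  | cons c rest ih =>
    intro i hi f s l b
    have h1 : ¬ (i + 1 = 1) := by omega
    have h2 : ¬ (i + 1 = 2) := by omega
    rw [List.foldl_cons]
    show List.foldl pvStep (pvStep (i, f, s, l, b) c) rest = _
    rw [show pvStep (i, f, s, l, b) c
        = (i + 1, f, s, some c, b || !("{[;,]}'\"".toList.contains c)) by
      simp [pvStep, h1, h2]]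
    rw [ih (i + 1) (by omega) f s (some c) _]
    refine Prod.ext ?_ (Prod.ext rfl (Prod.ext rfl (Prod.ext ?_ ?_)))
    · simp [List.length_cons]; ring
    · exact getLast?_cons_or c rest
    · simp [Bool.or_assoc]

lemma endswith_single (cs : List Char) (x : Char) :
    PySem.Chars.endswith cs [x] = (cs.getLast? == some x) := by
  rw [Bool.eq_iff_iff, PySem.Chars.endswith_iff, beq_iff_eq]
  constructor
  · rintro ⟨t, rfl⟩; simp
  · intro h
    rw [List.getLast?_eq_some_iff] at h
    obtain ⟨t, rfl⟩ := h
    exact ⟨t, rfl⟩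

lemma startswith_two (c1 : Char) (rest : List Char) (x y : Char) :
    PySem.Chars.startswith (c1 :: rest) [x, y] = ((c1 == x) && (rest.head? == some y)) := by
  rw [Bool.eq_iff_iff, PySem.Chars.startswith_iff]
  cases rest with
  | nil => simp [List.cons_prefix_cons]
  | cons c2 t =>
    simp only [List.cons_prefix_cons, List.head?_cons, List.nil_prefix, and_true,
      Option.some.injEq, Bool.and_eq_true, beq_iff_eq]
    constructor <;> rintro ⟨rfl, rfl⟩ <;> exact ⟨rfl, rfl⟩

lemma any_not_eq_not_all (cs : List Char) (p : Char → Bool) :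
    cs.any (fun c => !(p c)) = !(cs.all p) := by
  induction cs with
  | nil => rfl
  | cons c t ih => simp [List.any_cons, List.all_cons, ih]

lemma startswith_one (c1 : Char) (rest : List Char) (x : Char) :
    PySem.Chars.startswith (c1 :: rest) [x] = (c1 == x) := by
  rw [Bool.eq_iff_iff, PySem.Chars.startswith_iff, beq_iff_eq]
  simp only [List.cons_prefix_cons, List.nil_prefix, and_true]
  exact eq_comm

-- the scan state after a whole nonempty string
lemma foldl_char (c1 : Char) (rest : List Char) :
    (c1 :: rest).foldl pvStep (0, none, none, none, false) =
      (((1 : Int) + rest.length), some c1, rest.head?, (c1 :: rest).getLast?,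
       (c1 :: rest).any (fun c => !("{[;,]}'\"".toList.contains c))) := by
  cases rest with
  | nil =>
    rw [List.foldl_cons, List.foldl_nil]
    show pvStep (0, none, none, none, false) c1 = _
    simp [pvStep]
  | cons c2 rest2 =>
    rw [List.foldl_cons, List.foldl_cons,
      show pvStep (0, none, none, none, false) c1
        = (1, some c1, none, some c1, !("{[;,]}'\"".toList.contains c1)) by simp [pvStep],
      show pvStep ((1 : Int), some c1, none, some c1, !("{[;,]}'\"".toList.contains c1)) c2
        = (2, some c1, some c2, some c2,
           !("{[;,]}'\"".toList.contains c1) || !("{[;,]}'\"".toList.contains c2)) by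
        simp [pvStep],
      foldl_tail rest2 2 (by omega)]
    refine Prod.ext ?_ (Prod.ext rfl (Prod.ext rfl (Prod.ext ?_ ?_)))
    · simp [List.length_cons]; ring
    · rw [getLast?_cons_or, List.getLast?_cons_cons]
    · simp [Bool.or_assoc]

-- A's wrapper-branch chain with all-punct fallback equals B's table lookup + flag
lemma core_eq (cs : List Char) : is_significant_change (String.ofList cs) = is_significant_change_alt (String.ofList cs) := by
  cases cs with
  | nil => simp [is_significant_change, is_significant_change_alt]
  | cons c1 rest =>
    obtain ⟨L, hL⟩ : ∃ L, (c1 :: rest).getLast? = some L := by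
      cases h : (c1 :: rest).getLast? with
      | none => simp [List.getLast?_eq_none_iff] at h
      | some x => exact ⟨x, rfl⟩
    unfold is_significant_change is_significant_change_alt
    simp only [PySem.Str.startswith_eq, PySem.Str.endswith_eq, String.toList_ofList]
    rw [show ("//".toList) = ['/', '/'] from rfl,
        show ("{".toList) = ['{'] from rfl, show ("}".toList) = ['}'] from rfl,
        show ("[".toList) = ['['] from rfl, show ("]".toList) = [']'] from rfl,
        show ("\"".toList) = ['\"'] from rfl,
        show ("(".toList) = ['('] from rfl, show (")".toList) = [')'] from rfl]
    rw [startswith_two, startswith_one, startswith_one, startswith_one, startswith_one,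
        endswith_single, endswith_single, endswith_single, endswith_single, hL]
    simp only [foldl_char, List.isEmpty_cons, Bool.false_eq_true, if_false,
      any_not_eq_not_all]
    rw [hL]
    by_cases hs : (c1 == '/' && rest.head? == some '/') = true
    · rw [if_pos hs, if_pos hs]
    · rw [if_neg hs, if_neg hs]
      by_cases h1 : c1 = '{'
      · subst h1
        rcases eq_or_ne L '}' with rfl | hx
        · simp [show pvCloser.get? '{' = some '}' from rfl]
        · have hx2 : ('}' : Char) ≠ L := Ne.symm hx
          cases hall : (('{' :: rest).all fun c => "{[;,]}'\"".toList.contains c) <;>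
          simp [show pvCloser.get? '{' = some '}' from rfl, hx, hx2]
      · by_cases h2 : c1 = '['
        · subst h2
          rcases eq_or_ne L ']' with rfl | hx
          · simp [show pvCloser.get? '[' = some ']' from rfl]
          · have hx2 : (']' : Char) ≠ L := Ne.symm hx
            cases hall : (('[' :: rest).all fun c => "{[;,]}'\"".toList.contains c) <;>
              simp [show pvCloser.get? '[' = some ']' from rfl, hx, hx2]
        · by_cases h3 : c1 = '\"'
          · subst h3
            rcases eq_or_ne L '\"' with rfl | hx
            · simp [show pvCloser.get? '\"' = some '\"' from rfl]
            · have hx2 : ('\"' : Char) ≠ L := Ne.symm hx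
              cases hall : (('\"' :: rest).all fun c => "{[;,]}'\"".toList.contains c) <;>
                simp [show pvCloser.get? '\"' = some '\"' from rfl, hx, hx2]
          · by_cases h4 : c1 = '('
            · subst h4
              rcases eq_or_ne L ')' with rfl | hx
              · simp [show pvCloser.get? '(' = some ')' from rfl]
              · have hx2 : (')' : Char) ≠ L := Ne.symm hx
                cases hall : (('(' :: rest).all fun c => "{[;,]}'\"".toList.contains c) <;>
                  simp [show pvCloser.get? '(' = some ')' from rfl, hx, hx2]
            · have e1 : ('{' == c1) = false := by simp [Ne.symm h1]
              have e2 : ('[' == c1) = false := by simp [Ne.symm h2]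
              have e3 : ('\"' == c1) = false := by simp [Ne.symm h3]
              have e4 : ('(' == c1) = false := by simp [Ne.symm h4]
              have hget : pvCloser.get? c1 = none := by
                simp [pvCloser, PySem.Dict.get?, PySem.Dict.empty, PySem.Dict.insert,
                  List.find?, e1, e2, e3, e4]
              cases hall : ((c1 :: rest).all fun c => "{[;,]}'\"".toList.contains c) <;>
                simp [hget, h1, h2, h3, h4]


-- ===== VERDICT (by name: the statement is the Claim_ definition above) =====
theorem is_significant_change_spec : Claim_equal_is_significant_change := by
  intro code _
  unfold Spec_is_significant_change
  have := core_eq code.toList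
  rwa [String.ofList_toList] at this
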